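-- pv_equiv track=rewrite | github.com/GuramiPapunashvili/GOA-homework | day 27/day 27_HW.py | odd_and_even
-- ===== SOURCE A (Python) =====
-- def odd_and_even(string_list):
--     final_list = []
--     for i in range(len(string_list)):
--         if i % 2 == 0:
--             final_list.append(string_list[i].upper())
--         elif i % 2 != 0:
--             final_list.append(string_list[i].lower())
--     return final_list
-- ===== SOURCE B (Python) =====
-- def odd_and_even(string_list):
--     final_list = []
--     it = iter(string_list)
--     for a in it:
--         final_list.append(a.upper())
--         b = next(it, None)
--         if b is not None:
--             final_list.append(b.lower())
--     return final_list
-- ===== Notes on version B (the rewrite author's own statement) =====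
-- stated objective: alternative
-- what changed: Replaced the index loop with a per-index parity test by a single iterator pass that consumes the list in pairs (upper the first of each pair, lower the second), so no indexing and no modulo arithmetic remain.
import Mathlib
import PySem

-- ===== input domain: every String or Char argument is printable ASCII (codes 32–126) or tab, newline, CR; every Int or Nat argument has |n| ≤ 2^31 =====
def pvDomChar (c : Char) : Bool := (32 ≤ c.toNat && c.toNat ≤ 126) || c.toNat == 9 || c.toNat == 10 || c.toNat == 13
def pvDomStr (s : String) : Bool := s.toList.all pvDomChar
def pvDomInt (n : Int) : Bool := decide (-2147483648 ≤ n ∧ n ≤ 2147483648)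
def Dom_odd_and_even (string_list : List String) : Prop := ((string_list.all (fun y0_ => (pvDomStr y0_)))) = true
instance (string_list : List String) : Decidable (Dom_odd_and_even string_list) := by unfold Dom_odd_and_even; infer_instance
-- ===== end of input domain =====

-- B replaces A's per-index parity branch by one iterator pass consuming the list in pairs (objective: alternative decomposition, same cost)

-- ===== PORT A =====
-- for i in range(len(string_list)): if i % 2 == 0 append upper, elif i % 2 != 0 append lower
-- (indices produced by range are the natural numbers 0..len-1, so the loop is over List.range;
--  string_list[i] is always in range here, ported as pyGet? with a default that is never used)
def odd_and_even (string_list : List String) : List String :=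
  (List.range string_list.length).foldl (fun (final_list : List String) (i : Nat) =>
    if i % 2 = 0 then
      final_list ++ [PySem.Str.upper ((PySem.List.pyGet? string_list (i : Int)).getD "")]
    else if i % 2 ≠ 0 then
      final_list ++ [PySem.Str.lower ((PySem.List.pyGet? string_list (i : Int)).getD "")]
    else final_list) []

-- ===== PORT B =====
-- the for-loop over the iterator takes one element a (uppered) and, if present, a second
-- element b (lowered) per iteration, then continues on the remainder
def odd_and_even_alt : List String → List String
  | [] => []
  | a :: rest =>
    match rest with
    | [] => [PySem.Str.upper a]
    | b :: r => PySem.Str.upper a :: PySem.Str.lower b :: odd_and_even_alt r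

-- ===== PRECONDITION & SPEC =====
def Spec_odd_and_even (string_list : List String) (out : List String) : Prop := out = odd_and_even_alt string_list
instance (string_list : List String) (out : List String) : Decidable (Spec_odd_and_even string_list out) := by unfold Spec_odd_and_even; infer_instance

-- ===== CLAIM (what is proved, stated in full; the proofs are below) =====
def Claim_equal_odd_and_even : Prop := ∀ (string_list : List String), Dom_odd_and_even string_list → Spec_odd_and_even string_list (odd_and_even string_list)

-- ===== LEMMAS AND PROOFS =====

lemma pvFlatten_singleton {α β : Type} (f : α → β) (l : List α) :
    (l.map (fun i => [f i])).flatten = l.map f := by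
  induction l with
  | nil => rfl
  | cons a t ih => simp [ih]

-- the per-index transform A applies
def pvG (l : List String) (i : Nat) : String :=
  if i % 2 = 0 then PySem.Str.upper ((PySem.List.pyGet? l (i : Int)).getD "")
  else PySem.Str.lower ((PySem.List.pyGet? l (i : Int)).getD "")

lemma pvA_as_map (l : List String) :
    odd_and_even l = (List.range l.length).map (pvG l) := by
  unfold odd_and_even
  have hbody : (fun (final_list : List String) (i : Nat) =>
      if i % 2 = 0 then
        final_list ++ [PySem.Str.upper ((PySem.List.pyGet? l (i : Int)).getD "")]
      else if i % 2 ≠ 0 then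
        final_list ++ [PySem.Str.lower ((PySem.List.pyGet? l (i : Int)).getD "")]
      else final_list)
      = (fun (final_list : List String) (i : Nat) => final_list ++ [pvG l i]) := by
    funext acc i
    by_cases h : i % 2 = 0 <;> simp [pvG, h]
  rw [hbody, PySem.List.foldl_append_eq_flatMap]
  simp only [List.flatMap_def, List.nil_append]
  exact pvFlatten_singleton (pvG l) (List.range l.length)
lemma pvG_shift (a b : String) (r : List String) (i : Nat) :
    pvG (a :: b :: r) (i + 2) = pvG r i := by
  unfold pvG
  have h2 : (i + 2) % 2 = i % 2 := by omega
  have hget : PySem.List.pyGet? (a :: b :: r) ((i + 2 : Nat) : Int)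
      = PySem.List.pyGet? r (i : Nat) := by
    rw [PySem.List.pyGet?_natCast, PySem.List.pyGet?_natCast]
    simp [List.getElem?_cons_succ]
  rw [h2, hget]

lemma pvMap_range_succ {β : Type} (n : Nat) (f : Nat → β) :
    (List.range (n + 1)).map f = f 0 :: (List.range n).map (fun i => f (i + 1)) := by
  rw [List.range_succ_eq_map, List.map_cons, List.map_map]
  rfl

lemma pvMap_eq_alt : ∀ (l : List String), (List.range l.length).map (pvG l) = odd_and_even_alt l
  | [] => by simp [odd_and_even_alt]
  | [a] => by
      simp [odd_and_even_alt, pvG]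
  | a :: b :: r => by
      have h0 : pvG (a :: b :: r) 0 = PySem.Str.upper a := by
        simp [pvG]
      have h1 : pvG (a :: b :: r) 1 = PySem.Str.lower b := by
        simp [pvG]
      have hlen : (a :: b :: r).length = r.length + 1 + 1 := by simp
      rw [hlen, pvMap_range_succ, pvMap_range_succ]
      have htail : (List.range r.length).map (fun i => pvG (a :: b :: r) (i + 1 + 1))
          = (List.range r.length).map (pvG r) := by
        apply List.map_congr_left
        intro i _
        exact pvG_shift a b r i
      rw [htail, h0, h1]
      rw [pvMap_eq_alt r]
      rfl

-- ===== VERDICT (by name: the statement is the Claim_ definition above) =====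
theorem odd_and_even_spec : Claim_equal_odd_and_even := by
  intro l _
  unfold Spec_odd_and_even
  rw [pvA_as_map, pvMap_eq_alt]
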